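-- pv_equiv track=rewrite | github.com/huid857/wanzheng- | advanced_shoe_analyzer.py | _count_long_streaks
-- ===== SOURCE A (Python) =====
-- def _count_long_streaks(data):
--     """统计长龙（连续4+次）数量"""
--     if not data:
--         return 0
--
--     count = 0
--     current_streak = 1
--
--     for i in range(1, len(data)):
--         if data[i] == data[i - 1]:
--             current_streak += 1
--         else:
--             if current_streak >= 4:
--                 count += 1
--             current_streak = 1
--
--     if current_streak >= 4:
--         count += 1
--
--     return count
-- ===== SOURCE B (Python) =====
-- def _count_long_streaks(data):
--     """统计长龙（连续4+次）数量 — sliding-window run-start detection: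
--     count positions i where a window of 4 equal values begins a maximal run."""
--     n = len(data)
--     return sum(
--         1
--         for i in range(n - 3)
--         if data[i] == data[i + 1] == data[i + 2] == data[i + 3]
--         and (i == 0 or data[i - 1] != data[i])
--     )
-- ===== Notes on version B (the rewrite author's own statement) =====
-- stated objective: alternative
-- what changed: Replaces A's streak-counter state machine (index loop carrying current_streak with a post-loop flush) by a sliding-window scan that counts the positions where a window of 4 equal values begins a maximal run.
import Mathlib
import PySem

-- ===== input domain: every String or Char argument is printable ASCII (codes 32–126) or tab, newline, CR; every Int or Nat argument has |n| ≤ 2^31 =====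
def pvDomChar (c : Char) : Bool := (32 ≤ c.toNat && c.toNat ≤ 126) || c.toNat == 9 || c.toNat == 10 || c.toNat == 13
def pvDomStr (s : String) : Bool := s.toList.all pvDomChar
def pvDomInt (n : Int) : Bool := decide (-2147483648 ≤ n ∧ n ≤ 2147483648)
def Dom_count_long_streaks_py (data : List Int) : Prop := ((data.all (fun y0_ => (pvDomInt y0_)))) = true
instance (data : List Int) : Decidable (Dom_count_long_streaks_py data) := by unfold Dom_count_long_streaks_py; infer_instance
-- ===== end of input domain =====

-- B replaces A's streak-counter state machine (index loop with post-loop flush) by a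
-- sliding-window scan: it counts the positions where a window of 4 equal values begins
-- a maximal run (data[i]==data[i+1]==data[i+2]==data[i+3] and data[i-1]!=data[i] or i==0).


-- ===== PORT A =====
-- A's for-loop over i in range(1, len(data)) compares data[i] with data[i-1]:
-- transliterated as structural recursion over the tail carrying (count, current_streak, prev).
def pvALoop (count : Int) (streak : Int) (prev : Int) : List Int → Int × Int
  | [] => (count, streak)
  | x :: xs =>
    if x = prev then pvALoop count (streak + 1) x xs
    else
      if streak ≥ 4 then pvALoop (count + 1) 1 x xs
      else pvALoop count 1 x xs

def count_long_streaks_py (data : List Int) : Int :=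
  match data with
  | [] => 0
  | x :: xs =>
    let st := pvALoop 0 1 x xs
    if st.2 ≥ 4 then st.1 + 1 else st.1

-- ===== PORT B =====
-- Source B's window test data[i]==data[i+1]==data[i+2]==data[i+3]; every index Source B reads is in
-- range (i ≤ n-4, and i-1 only when i ≥ 1), so List.getD is exact here.
def pvWin (data : List Int) (i : Nat) : Bool :=
  (data.getD i 0 == data.getD (i + 1) 0) && (data.getD (i + 1) 0 == data.getD (i + 2) 0)
    && (data.getD (i + 2) 0 == data.getD (i + 3) 0)

-- Source B's full condition: window of 4 equal values that begins a maximal run.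
def pvCheck (data : List Int) (i : Nat) : Bool :=
  pvWin data i && (i == 0 || !(data.getD (i - 1) 0 == data.getD i 0))

-- sum(1 for i in range(n-3) if <cond>)
def count_long_streaks_py_alt (data : List Int) : Int :=
  ((List.range (data.length - 3)).countP (pvCheck data) : Int)

-- ===== PRECONDITION & SPEC =====
def Spec_count_long_streaks_py (data : List Int) (out : Int) : Prop := out = count_long_streaks_py_alt data
instance (data : List Int) (out : Int) : Decidable (Spec_count_long_streaks_py data out) := by unfold Spec_count_long_streaks_py; infer_instance

-- ===== CLAIM (what is proved, stated in full; the proofs are below) =====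
def Claim_equal_count_long_streaks_py : Prop := ∀ (data : List Int), Dom_count_long_streaks_py data → Spec_count_long_streaks_py data (count_long_streaks_py data)

-- ===== LEMMAS AND PROOFS =====

-- peel index 0 off a countP over List.range
theorem pvCountP_range_succ (f : Nat → Bool) (m : Nat) :
    (List.range (m + 1)).countP f
      = (if f 0 then 1 else 0) + (List.range m).countP (fun j => f (j + 1)) := by
  rw [List.range_succ_eq_map, List.countP_cons, List.countP_map]
  simp only [Function.comp_def, Nat.succ_eq_add_one]
  omega

-- peel indices 0 and 1 off a countP over List.range
theorem pvCountP_range_two (f : Nat → Bool) (m : Nat) :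
    (List.range (m + 2)).countP f
      = ((if f 0 then 1 else 0) + (if f 1 then 1 else 0))
          + (List.range m).countP (fun j => f (j + 1 + 1)) := by
  rw [show m + 2 = (m + 1) + 1 from rfl, pvCountP_range_succ, pvCountP_range_succ]
  simp only [Nat.zero_add]
  omega

-- pointwise-equal predicates count the same
theorem pvCountP_ext (p q : Nat → Bool) (l : List Nat) (h : ∀ a ∈ l, p a = q a) :
    l.countP p = l.countP q :=
  List.countP_congr (fun a ha => by rw [h a ha])

-- index shift: for j ≥ 1 the check at j+1 in a::l is the check at j in l
theorem pvShift (a : Int) (l : List Int) (j : Nat) (hj : 1 ≤ j) :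
    pvCheck (a :: l) (j + 1) = pvCheck l j := by
  match j, hj with
  | (k + 1), _ => simp [pvCheck, pvWin]

-- at j = 1 with distinct first elements the neighbour condition holds on both sides
theorem pvShift0 (a b : Int) (l : List Int) (hab : a ≠ b) :
    pvCheck (a :: b :: l) 1 = pvCheck (b :: l) 0 := by
  simp [pvCheck, pvWin, List.getD, hab]

-- at j = 1 with equal first elements the check fails (not a run start)
theorem pvCheck1_false (a : Int) (l : List Int) :
    pvCheck (a :: a :: l) 1 = false := by
  simp [pvCheck]

theorem pvCheck0 (x : Int) (xs : List Int) (h : 3 ≤ xs.length) :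
    pvCheck (x :: xs) 0 = decide (4 ≤ 1 + ((xs.takeWhile (· == x)).length : Int)) := by
  match xs, h with
  | b :: c :: d :: rest, _ =>
    simp only [pvCheck, pvWin, List.getD_cons_succ, List.getD_cons_zero]
    by_cases hb : b = x
    · rw [List.takeWhile_cons_of_pos (by simp [hb])]
      by_cases hc : c = x
      · rw [List.takeWhile_cons_of_pos (by simp [hc])]
        by_cases hd : d = x
        · rw [List.takeWhile_cons_of_pos (by simp [hd])]
          have hP : (4 : Int) ≤ 1 + (((rest.takeWhile (· == x)).length + 1 + 1 + 1 : Nat) : Int) := by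
            push_cast; omega
          simp only [List.length_cons, hP, decide_true, hb, hc, hd]
          simp
        · rw [List.takeWhile_cons_of_neg (by simp [hd])]
          have hcd : (c == d) = false := by
            refine beq_eq_false_iff_ne.mpr ?_
            rw [hc]; exact fun hh => hd hh.symm
          simp [hcd]
      · rw [List.takeWhile_cons_of_neg (by simp [hc])]
        have hbc : (b == c) = false := by
          refine beq_eq_false_iff_ne.mpr ?_
          rw [hb]; exact fun hh => hc hh.symm
        simp [hbc]
    · rw [List.takeWhile_cons_of_neg (by simp [hb])]
      have hxb : (x == b) = false := by
        refine beq_eq_false_iff_ne.mpr ?_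
        exact fun hh => hb hh.symm
      simp [hxb]

theorem pvAlt_nil : count_long_streaks_py_alt [] = 0 := by
  simp [count_long_streaks_py_alt]

-- core structural characterisation of B: peel the maximal head run
theorem pvAlt_cons (xs : List Int) : ∀ (x : Int),
    count_long_streaks_py_alt (x :: xs)
      = (if (1 + ((xs.takeWhile (· == x)).length : Int)) ≥ 4 then 1 else 0)
          + count_long_streaks_py_alt (xs.dropWhile (· == x)) := by
  induction xs with
  | nil =>
    intro x
    simp [count_long_streaks_py_alt, List.takeWhile, List.dropWhile]
  | cons y ys ih =>
    intro x
    by_cases hxy : y = x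
    · subst hxy
      rw [List.takeWhile_cons_of_pos (by simp), List.dropWhile_cons_of_pos (by simp)]
      have ihy := ih y
      rcases ys with _ | ⟨c, ys'⟩
      · -- [y, y]
        simp [count_long_streaks_py_alt, List.takeWhile, List.dropWhile]
      rcases ys' with _ | ⟨d, ys''⟩
      · -- [y, y, c]
        by_cases hc : c = y
        · simp [count_long_streaks_py_alt, List.takeWhile, List.dropWhile, hc]
        · have hcy : (c == y) = false := by simp [hc]
          simp [count_long_streaks_py_alt, List.takeWhile, List.dropWhile, hcy]
      rcases ys'' with _ | ⟨e, rest⟩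
      · -- [y, y, c, d] : the window fits exactly once; compute both sides
        by_cases hc : c = y
        · by_cases hd : d = y
          · simp [count_long_streaks_py_alt, List.takeWhile, List.dropWhile,
              List.range_succ, pvCheck, pvWin, List.getD, hc, hd]
          · have hdy : (d == y) = false := by simp [hd]
            have hyd : (y == d) = false := by simp [Ne.symm hd]
            simp [count_long_streaks_py_alt, List.takeWhile, List.dropWhile,
              List.range_succ, pvCheck, pvWin, List.getD, hc, hdy, hyd]
        · have hcy : (c == y) = false := by simp [hc]
          have hyc : (y == c) = false := by simp [Ne.symm hc]
          simp [count_long_streaks_py_alt, List.takeWhile, List.dropWhile,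
            List.range_succ, pvCheck, pvWin, List.getD, hcy, hyc]
      · -- ys = c :: d :: e :: rest : the general case, via index peeling and shifting
        have elong : count_long_streaks_py_alt (y :: y :: c :: d :: e :: rest)
            = (if pvCheck (y :: y :: c :: d :: e :: rest) 0 then 1 else 0)
                + ((List.range rest.length).countP
                    (fun j => pvCheck (y :: y :: c :: d :: e :: rest) (j + 1 + 1)) : Int) := by
          have hl : (y :: y :: c :: d :: e :: rest).length - 3 = rest.length + 2 := by simp
          simp only [count_long_streaks_py_alt, hl, pvCountP_range_two,
            pvCheck1_false y (c :: d :: e :: rest), if_false, Bool.false_eq_true]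
          push_cast
          ring
        have eshort : count_long_streaks_py_alt (y :: c :: d :: e :: rest)
            = (if pvCheck (y :: c :: d :: e :: rest) 0 then 1 else 0)
                + ((List.range rest.length).countP
                    (fun j => pvCheck (y :: c :: d :: e :: rest) (j + 1)) : Int) := by
          have hl : (y :: c :: d :: e :: rest).length - 3 = rest.length + 1 := by simp
          simp only [count_long_streaks_py_alt, hl, pvCountP_range_succ]
          push_cast
          ring
        have etails : (List.range rest.length).countP
              (fun j => pvCheck (y :: y :: c :: d :: e :: rest) (j + 1 + 1))
            = (List.range rest.length).countP
              (fun j => pvCheck (y :: c :: d :: e :: rest) (j + 1)) := by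
          apply pvCountP_ext
          intro j _
          exact pvShift y (y :: c :: d :: e :: rest) (j + 1) (by omega)
        have hc0long : pvCheck (y :: y :: c :: d :: e :: rest) 0
            = decide (4 ≤ 1 + (((y :: c :: d :: e :: rest).takeWhile (· == y)).length : Int)) :=
          pvCheck0 y (y :: c :: d :: e :: rest) (by simp)
        have hc0short : pvCheck (y :: c :: d :: e :: rest) 0
            = decide (4 ≤ 1 + (((c :: d :: e :: rest).takeWhile (· == y)).length : Int)) :=
          pvCheck0 y (c :: d :: e :: rest) (by simp)
        rw [elong, etails, hc0long, List.takeWhile_cons_of_pos (by simp)]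
        rw [eshort, hc0short] at ihy
        simp only [List.length_cons, decide_eq_true_eq] at ihy ⊢
        push_cast at ihy ⊢
        split_ifs at ihy ⊢ <;> omega
    · -- the head run breaks immediately: B(x :: y :: ys) = B(y :: ys)
      have hyx : (y == x) = false := by simp [hxy]
      have hxyb : (x == y) = false := by simp [Ne.symm hxy]
      rw [List.takeWhile_cons_of_neg (by simp [hyx]), List.dropWhile_cons_of_neg (by simp [hyx])]
      have hzero : ¬ ((1 : Int) + (([] : List Int).length : Int)) ≥ 4 := by simp
      rw [if_neg hzero]
      rcases ys with _ | ⟨c, ys'⟩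
      · simp [count_long_streaks_py_alt]
      rcases ys' with _ | ⟨d, rest⟩
      · simp [count_long_streaks_py_alt]
      -- y :: c :: d :: rest : peel index 0 (which fails since x ≠ y) and shift
      have hlenL : (x :: y :: c :: d :: rest).length - 3 = rest.length + 1 := by simp
      have hlenS : (y :: c :: d :: rest).length - 3 = rest.length := by simp
      have h0 : pvCheck (x :: y :: c :: d :: rest) 0 = false := by
        simp [pvCheck, pvWin, List.getD, hxyb]
      have etails : (List.range rest.length).countP
            (fun j => pvCheck (x :: y :: c :: d :: rest) (j + 1))
          = (List.range rest.length).countP (pvCheck (y :: c :: d :: rest)) := by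
        apply pvCountP_ext
        intro j _
        rcases Nat.eq_zero_or_pos j with rfl | hj
        · exact pvShift0 x y (c :: d :: rest) (fun h => hxy h.symm)
        · exact pvShift x (y :: c :: d :: rest) j hj
      simp only [count_long_streaks_py_alt, hlenL, hlenS, pvCountP_range_succ, h0,
        Bool.false_eq_true, if_false, etails]
      push_cast
      ring

-- proof-only helper: A's post-loop flush
def pvFinal (st : Int × Int) : Int := if st.2 ≥ 4 then st.1 + 1 else st.1

-- Invariant of A's loop: flushing the final streak equals counting the current
-- (partially consumed) run plus B's count of the remaining runs.
theorem pvLoop_inv (xs : List Int) : ∀ (count streak prev : Int),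
    pvFinal (pvALoop count streak prev xs)
      = count + (if streak + (xs.takeWhile (· == prev)).length ≥ 4 then 1 else 0)
          + count_long_streaks_py_alt (xs.dropWhile (· == prev)) := by
  induction xs with
  | nil =>
    intro count streak prev
    simp only [pvALoop, pvFinal, List.takeWhile, List.dropWhile, pvAlt_nil,
      List.length_nil, Int.natCast_zero]
    split_ifs <;> omega
  | cons x xs ih =>
    intro count streak prev
    by_cases hx : x = prev
    · simp only [pvALoop, List.takeWhile, List.dropWhile, hx, beq_self_eq_true, ite_true]
      rw [ih count (streak + 1) prev]
      simp only [List.length_cons]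
      push_cast
      split_ifs <;> omega
    · have hb : (x == prev) = false := by simp [hx]
      simp only [pvALoop, List.takeWhile, List.dropWhile, hb, if_neg hx]
      rw [pvAlt_cons xs x]
      by_cases h4 : streak ≥ (4 : Int)
      · rw [if_pos h4, ih (count + 1) 1 x]
        simp only [List.length_nil]
        push_cast
        split_ifs <;> omega
      · rw [if_neg h4, ih count 1 x]
        simp only [List.length_nil]
        push_cast
        split_ifs <;> omega

-- ===== VERDICT (by name: the statement is the Claim_ definition above) =====
theorem count_long_streaks_py_spec : Claim_equal_count_long_streaks_py := by
  intro data _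
  unfold Spec_count_long_streaks_py
  cases data with
  | nil => simp [count_long_streaks_py, pvAlt_nil]
  | cons x xs =>
    show pvFinal (pvALoop 0 1 x xs) = _
    rw [pvLoop_inv xs 0 1 x, pvAlt_cons xs x]
    omega
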